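-- pv_equiv track=rewrite | github.com/Uks130322/yandex_algs_6.0 | algs_6_4/task_I_1.py | find_max_branches
-- ===== SOURCE A (Python) =====
-- def find_max_branches(tree, diameter_path):
--     diameter_set = set(diameter_path)
--     max_branches = [0] * len(tree)
--
--     def dfs(node, parent):
--         branch_length = 0
--         for child in tree[node]:
--             if child == parent or child in diameter_set:
--                 continue
--             branch_length = max(branch_length, dfs(child, node) + 1)
--         max_branches[node] = branch_length
--         return branch_length
--
--     for path_node in diameter_path:
--         dfs(path_node, -1)
--
--     return max_branches
-- ===== SOURCE B (Python) =====
-- def find_max_branches(tree, diameter_path):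
--     dset = set(diameter_path)
--     res = [0] * len(tree)
--     for start in diameter_path:
--         stack = [(start, -1, list(tree[start]), 0)]
--         while stack:
--             node, parent, rest, best = stack.pop()
--             k = 0
--             while k < len(rest) and (rest[k] == parent or rest[k] in dset):
--                 k += 1
--             if k < len(rest):
--                 child = rest[k]
--                 stack.append((node, parent, rest[k + 1:], best))
--                 stack.append((child, node, list(tree[child]), 0))
--             else:
--                 res[node] = best
--                 if stack:
--                     pn, pp, prest, pbest = stack.pop()
--                     stack.append((pn, pp, prest, max(pbest, best + 1)))
--     return res
-- ===== Notes on version B (the rewrite author's own statement) =====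
-- stated objective: alternative
-- what changed: The recursive dfs with a mutated outer array is replaced by an explicit stack-based iterative post-order traversal whose frames carry (node, parent, unscanned children, best branch so far), propagating each finished node's value into its parent's frame instead of via return values.
import Mathlib
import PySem

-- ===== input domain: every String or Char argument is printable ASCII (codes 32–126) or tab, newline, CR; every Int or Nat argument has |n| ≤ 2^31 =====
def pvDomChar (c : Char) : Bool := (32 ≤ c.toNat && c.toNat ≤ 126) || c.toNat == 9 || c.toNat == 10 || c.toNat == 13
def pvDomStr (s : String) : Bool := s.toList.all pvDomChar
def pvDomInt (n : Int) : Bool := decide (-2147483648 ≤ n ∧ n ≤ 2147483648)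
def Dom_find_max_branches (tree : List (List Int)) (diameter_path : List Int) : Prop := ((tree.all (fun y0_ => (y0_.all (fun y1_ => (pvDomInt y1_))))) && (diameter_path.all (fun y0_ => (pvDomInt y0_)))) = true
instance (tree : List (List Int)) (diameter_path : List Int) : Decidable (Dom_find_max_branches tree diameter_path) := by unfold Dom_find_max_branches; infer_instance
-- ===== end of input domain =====

-- B replaces A's recursive DFS by an explicit stack-based iterative post-order traversal;
-- same return value (objective: alternative decomposition, no speed claim).

-- ===== PORT A =====
-- A's dfs as mutual recursion: pvLoopA is the for-loop over tree[node] (branch_length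
-- accumulator + the mutated max_branches list threaded through), pvDfsA one dfs call.
-- The Nat argument is fuel, a totality guard only: on inputs satisfying Pre_ (where
-- Python A terminates) it is chosen large enough that it never runs out.
mutual
def pvDfsA (tree : List (List Int)) (dset : List Int) : Nat → Int → Int → List Int → Int × List Int
  | 0, _, _, mb => (0, mb)
  | f+1, node, parent, mb =>
    let r := pvLoopA tree dset f node parent (PySem.List.pyGetD tree node []) 0 mb
    (r.1, PySem.List.pySetD r.2 node r.1)
termination_by f _ _ _ => (f, 0)
def pvLoopA (tree : List (List Int)) (dset : List Int) : Nat → Int → Int → List Int → Int → List Int → Int × List Int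
  | _, _, _, [], bl, mb => (bl, mb)
  | f, node, parent, c :: cs, bl, mb =>
    if c == parent || dset.contains c then pvLoopA tree dset f node parent cs bl mb
    else
      let r := pvDfsA tree dset f c node mb
      pvLoopA tree dset f node parent cs (max bl (r.1 + 1)) r.2
termination_by f _ _ cs _ _ => (f, cs.length + 1)
end

def pvFuel (tree : List (List Int)) (diameter_path : List Int) : Nat :=
  2 * (tree.map List.length).sum + diameter_path.length + 2

def find_max_branches (tree : List (List Int)) (diameter_path : List Int) : List Int :=
  let dset := PySem.Set.ofList diameter_path
  let mb := List.replicate tree.length (0 : Int)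
  diameter_path.foldl (fun mb p => (pvDfsA tree dset (pvFuel tree diameter_path) p (-1) mb).2) mb

-- ===== PORT B =====
-- Source B's inner while: skip children equal to parent or on the diameter path;
-- first valid child together with the children still to scan, or none.
def pvScanB (parent : Int) (dset : List Int) : List Int → Option (Int × List Int)
  | [] => none
  | c :: cs => if c == parent || dset.contains c then pvScanB parent dset cs else some (c, cs)

-- Source B's "pop the parent frame and re-push it with its best updated"
def pvBump (stack : List (Int × Int × List Int × Int × Nat)) (v : Int) : List (Int × Int × List Int × Int × Nat) :=
  match stack with
  | [] => []
  | (pn, pp, pr, pb, pf) :: t => (pn, pp, pr, max pb v, pf) :: t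

-- termination bookkeeping for the stack machine (cited by pvRunB's decreasing_by only)
def pvPhi (M : Nat) : Nat → Nat
  | 0 => 2
  | f+1 => M * pvPhi M f + 3

def pvMu (M : Nat) (fr : Int × Int × List Int × Int × Nat) : Nat :=
  match fr.2.2.2.2 with
  | 0 => 1
  | f+1 => 2 + fr.2.2.1.length * pvPhi M (f+1)

theorem pvMu_bump (M : Nat) (st : List (Int × Int × List Int × Int × Nat)) (v : Int) :
    ((pvBump st v).map (pvMu M)).sum = (st.map (pvMu M)).sum := by
  cases st with
  | nil => rfl
  | cons h t => rcases h with ⟨a, b, c, d, e⟩; rfl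

theorem pvScanB_length {parent : Int} {dset : List Int} : ∀ {rest c rest'},
    pvScanB parent dset rest = some (c, rest') → rest'.length < rest.length := by
  intro rest
  induction rest with
  | nil => intro c rest' h; simp [pvScanB] at h
  | cons x xs ih =>
    intro c rest' h
    rw [pvScanB] at h
    cases hx : (x == parent || dset.contains x) with
    | true =>
      rw [if_pos hx] at h
      exact Nat.lt_trans (ih h) (by simp)
    | false =>
      have hneg : ¬((x == parent || dset.contains x) = true) := by simp only [hx]; simp
      rw [if_neg hneg] at h
      cases h
      simp
  
theorem pvRow_le (tree : List (List Int)) (v : Int) :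
    (PySem.List.pyGetD tree v []).length ≤ (tree.map List.length).sum := by
  by_cases h : PySem.List.pyGet? tree v = none
  · simp [PySem.List.pyGetD, h]
  · rcases Option.ne_none_iff_exists'.mp h with ⟨row, hrow⟩
    have hm : row ∈ tree := PySem.List.mem_of_pyGet?_eq_some tree hrow
    have hmm : row.length ∈ tree.map List.length := List.mem_map_of_mem hm
    calc (PySem.List.pyGetD tree v []).length = row.length := by simp [PySem.List.pyGetD, hrow]
      _ ≤ (tree.map List.length).sum := List.single_le_sum (by intro x _; exact Nat.zero_le x) _ hmm

theorem pvMu_child_le (M : Nat) (c node : Int) (row : List Int) (f : Nat) (h : row.length ≤ M) :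
    pvMu M (c, node, row, 0, f) + 1 ≤ pvPhi M (f + 1) := by
  cases f with
  | zero =>
    have h0 : pvMu M (c, node, row, 0, 0) = 1 := rfl
    have h1 : pvPhi M (0 + 1) = M * 2 + 3 := rfl
    omega
  | succ g =>
    have h1 : row.length * pvPhi M (g + 1) ≤ M * pvPhi M (g + 1) :=
      Nat.mul_le_mul_right _ h
    have h2 : pvMu M (c, node, row, 0, g + 1) = 2 + row.length * pvPhi M (g + 1) := rfl
    have h3 : pvPhi M (g + 1 + 1) = M * pvPhi M (g + 1) + 3 := rfl
    omega

-- Source B's outer while-loop: one step pops a frame, scans for the next valid child and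
-- either descends into it (a fresh frame with one unit less fuel) or finishes the node
-- (write res[node] = best, bump the parent's best). Per-frame fuel is a totality guard.
def pvRunB (tree : List (List Int)) (dset : List Int) : List (Int × Int × List Int × Int × Nat) → List Int → List Int
  | [], res => res
  | (_, _, _, _, 0) :: stack, res => pvRunB tree dset (pvBump stack 1) res
  | (node, parent, rest, best, f+1) :: stack, res =>
    match h : pvScanB parent dset rest with
    | some (c, rest') =>
      pvRunB tree dset ((c, node, PySem.List.pyGetD tree c [], 0, f) :: (node, parent, rest', best, f+1) :: stack) res
    | none => pvRunB tree dset (pvBump stack (best + 1)) (PySem.List.pySetD res node best)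
termination_by stack _ => (stack.map (pvMu ((tree.map List.length).sum))).sum
decreasing_by
  · rw [pvMu_bump]; simp [pvMu]
  · have h1 := pvScanB_length h
    have h2 := pvRow_le tree c
    have h3 := pvMu_child_le ((tree.map List.length).sum) c node (PySem.List.pyGetD tree c []) f h2
    have h4 : rest'.length * pvPhi ((tree.map List.length).sum) (f + 1) + pvPhi ((tree.map List.length).sum) (f + 1) ≤ rest.length * pvPhi ((tree.map List.length).sum) (f + 1) := by
      have h5 : (rest'.length + 1) * pvPhi ((tree.map List.length).sum) (f + 1) ≤ rest.length * pvPhi ((tree.map List.length).sum) (f + 1) :=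
        Nat.mul_le_mul_right _ h1
      rw [Nat.succ_mul] at h5
      exact h5
    simp only [List.map_cons, List.sum_cons]
    have htop : pvMu ((tree.map List.length).sum) (node, parent, rest', best, f + 1) = 2 + rest'.length * pvPhi ((tree.map List.length).sum) (f + 1) := rfl
    have htop2 : pvMu ((tree.map List.length).sum) (node, parent, rest, best, f.succ) = 2 + rest.length * pvPhi ((tree.map List.length).sum) (f + 1) := rfl
    omega
  · rw [pvMu_bump]; simp [pvMu]

def find_max_branches_alt (tree : List (List Int)) (diameter_path : List Int) : List Int :=
  let dset := PySem.Set.ofList diameter_path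
  let res := List.replicate tree.length (0 : Int)
  diameter_path.foldl
    (fun res start =>
      pvRunB tree dset [(start, -1, PySem.List.pyGetD tree start [], 0, pvFuel tree diameter_path)] res)
    res

-- ===== PRECONDITION & SPEC =====
-- helpers for Pre_: the finite graph of traversal states (node, parent) that A's dfs walks
def pvSuccP (tree : List (List Int)) (diameter_path : List Int) (s : Int × Int) : List (Int × Int) :=
  (PySem.List.pyGetD tree s.1 []).filterMap
    (fun c => if c == s.2 || diameter_path.contains c then none else some (c, s.1))

def pvGrow (tree : List (List Int)) (diameter_path : List Int) : Nat → List (Int × Int) → List (Int × Int)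
  | 0, R => R
  | k+1, R =>
    pvGrow tree diameter_path k
      (R.foldl (fun acc s => (pvSuccP tree diameter_path s).foldl (fun a t => PySem.Set.add a t) acc) R)

def pvPeel (tree : List (List Int)) (diameter_path : List Int) : Nat → List (Int × Int) → List (Int × Int)
  | 0, C => C
  | k+1, C =>
    pvPeel tree diameter_path k
      (C.filter (fun s => (pvSuccP tree diameter_path s).any (fun t => C.contains t)))

def pvPreCheck (tree : List (List Int)) (diameter_path : List Int) : Bool :=
  let n := tree.length
  let K := 2 * (tree.map List.length).sum + diameter_path.length + 1
  let R := pvGrow tree diameter_path K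
    (PySem.Set.ofList (diameter_path.map (fun p => (p, (-1 : Int)))))
  (R.all (fun s => decide (-(n : Int) ≤ s.1 ∧ s.1 < (n : Int)))) &&
    (pvPeel tree diameter_path K R).isEmpty

-- Pre_: every traversal state reachable from the diameter path carries a valid (possibly
-- negative, Python-style) index and the reachable state graph is acyclic — exactly the
-- inputs on which Python A returns normally (on the others it raises IndexError or
-- RecursionError). A closure of the input's adjacency structure, not a run of either port.
def Pre_find_max_branches (tree : List (List Int)) (diameter_path : List Int) : Prop :=
  pvPreCheck tree diameter_path = true
instance (tree : List (List Int)) (diameter_path : List Int) : Decidable (Pre_find_max_branches tree diameter_path) := by unfold Pre_find_max_branches; infer_instance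

def pvWitness_find_max_branches : List (List Int) × List Int := ([[1], [0, 2], [1, 3], [2]], [1, 2])

def Spec_find_max_branches (tree : List (List Int)) (diameter_path : List Int) (out : List Int) : Prop := out = find_max_branches_alt tree diameter_path
instance (tree : List (List Int)) (diameter_path : List Int) (out : List Int) : Decidable (Spec_find_max_branches tree diameter_path out) := by unfold Spec_find_max_branches; infer_instance

-- ===== CLAIM (what is proved, stated in full; the proofs are below) =====
def Claim_equal_find_max_branches : Prop := ∀ (tree : List (List Int)) (diameter_path : List Int), Dom_find_max_branches tree diameter_path → Pre_find_max_branches tree diameter_path → Spec_find_max_branches tree diameter_path (find_max_branches tree diameter_path)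

-- ===== LEMMAS AND PROOFS =====

theorem pvBump_length (st : List (Int × Int × List Int × Int × Nat)) (v : Int) :
    (pvBump st v).length = st.length := by
  cases st with
  | nil => rfl
  | cons h t => rcases h with ⟨a, b, c, d, e⟩; rfl

-- denotation of a whole stack: finish the top frame via A's loop, write, bump, continue
def pvDen (tree : List (List Int)) (dset : List Int) : List (Int × Int × List Int × Int × Nat) → List Int → List Int
  | [], res => res
  | (_, _, _, _, 0) :: stack, res => pvDen tree dset (pvBump stack 1) res
  | (node, parent, rest, best, f+1) :: stack, res =>
    let r := pvLoopA tree dset f node parent rest best res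
    pvDen tree dset (pvBump stack (r.1 + 1)) (PySem.List.pySetD r.2 node r.1)
termination_by stack _ => stack.length
decreasing_by
  · rw [pvBump_length]; simp
  · rw [pvBump_length]; simp

-- scanning skips exactly the children A's loop skips
theorem pvLoopA_scan_none (tree : List (List Int)) (dset : List Int) (f : Nat) (node parent : Int) :
    ∀ rest best mb, pvScanB parent dset rest = none →
      pvLoopA tree dset f node parent rest best mb = (best, mb) := by
  intro rest
  induction rest with
  | nil => intro best mb _; simp [pvLoopA]
  | cons c cs ih =>
    intro best mb h
    rw [pvScanB] at h
    cases hc : (c == parent || dset.contains c) with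
    | true =>
      rw [if_pos hc] at h
      rw [pvLoopA, if_pos hc]
      exact ih best mb h
    | false =>
      rw [if_neg (by simp only [hc]; simp)] at h
      cases h

theorem pvLoopA_scan_some (tree : List (List Int)) (dset : List Int) (f : Nat) (node parent : Int) :
    ∀ rest best mb c rest', pvScanB parent dset rest = some (c, rest') →
      pvLoopA tree dset f node parent rest best mb =
        pvLoopA tree dset f node parent rest'
          (max best ((pvDfsA tree dset f c node mb).1 + 1)) (pvDfsA tree dset f c node mb).2 := by
  intro rest
  induction rest with
  | nil => intro best mb c rest' h; simp [pvScanB] at h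
  | cons x xs ih =>
    intro best mb c rest' h
    rw [pvScanB] at h
    cases hx : (x == parent || dset.contains x) with
    | true =>
      rw [if_pos hx] at h
      rw [pvLoopA, if_pos hx]
      exact ih best mb c rest' h
    | false =>
      rw [if_neg (by simp only [hx]; simp)] at h
      cases h
      rw [pvLoopA, if_neg (by simp only [hx]; simp)]

-- the machine computes the denotation
theorem pvRunB_eq_den (tree : List (List Int)) (dset : List Int) :
    ∀ stack res, pvRunB tree dset stack res = pvDen tree dset stack res := by
  intro stack res
  induction stack, res using pvRunB.induct tree dset with
  | case1 res => rw [pvRunB, pvDen]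
  | case2 a b c d stack res ih =>
    rw [pvRunB, pvDen]
    exact ih
  | case3 node parent rest best f stack res c rest' h ih =>
    rw [pvRunB, h]
    show pvRunB tree dset ((c, node, PySem.List.pyGetD tree c [], 0, f) :: (node, parent, rest', best, f + 1) :: stack) res = _
    rw [ih]
    cases f with
    | zero =>
      conv_lhs => rw [pvDen]
      show pvDen tree dset ((node, parent, rest', max best 1, 0 + 1) :: stack) res = _
      conv_lhs => rw [pvDen]
      conv_rhs => rw [pvDen]
      rw [pvLoopA_scan_some tree dset 0 node parent rest best res c rest' h]
      simp [pvDfsA]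
    | succ g =>
      conv_lhs => rw [pvDen]
      show pvDen tree dset
        ((node, parent, rest',
            max best ((pvLoopA tree dset g c node (PySem.List.pyGetD tree c []) 0 res).1 + 1),
            g + 1 + 1) :: stack)
          (PySem.List.pySetD (pvLoopA tree dset g c node (PySem.List.pyGetD tree c []) 0 res).2 c
            (pvLoopA tree dset g c node (PySem.List.pyGetD tree c []) 0 res).1) = _
      conv_lhs => rw [pvDen]
      conv_rhs => rw [pvDen]
      rw [pvLoopA_scan_some tree dset (g+1) node parent rest best res c rest' h]
      rw [pvDfsA]
  | case4 node parent rest best f stack res h ih =>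
    rw [pvRunB, h]
    show pvRunB tree dset (pvBump stack (best + 1)) (PySem.List.pySetD res node best) = _
    rw [ih]
    conv_rhs => rw [pvDen]
    rw [pvLoopA_scan_none tree dset f node parent rest best res h]

-- one fresh frame denotes one dfs call
theorem pvDen_single (tree : List (List Int)) (dset : List Int) (g : Nat) (p : Int) (res : List Int) :
    pvDen tree dset [(p, -1, PySem.List.pyGetD tree p [], 0, g + 1)] res =
      (pvDfsA tree dset (g + 1) p (-1) res).2 := by
  conv_lhs => rw [pvDen]
  show pvDen tree dset [] (PySem.List.pySetD (pvLoopA tree dset g p (-1) (PySem.List.pyGetD tree p []) 0 res).2 p (pvLoopA tree dset g p (-1) (PySem.List.pyGetD tree p []) 0 res).1) = _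
  rw [pvDen, pvDfsA]

-- ===== VERDICT =====
theorem find_max_branches_spec : Claim_equal_find_max_branches := by
  intro tree diameter_path _ _
  unfold Spec_find_max_branches
  unfold find_max_branches find_max_branches_alt
  have hfun : (fun (mb : List Int) (p : Int) =>
      (pvDfsA tree (PySem.Set.ofList diameter_path) (pvFuel tree diameter_path) p (-1) mb).2) =
      (fun (res : List Int) (start : Int) =>
        pvRunB tree (PySem.Set.ofList diameter_path)
          [(start, -1, PySem.List.pyGetD tree start [], 0, pvFuel tree diameter_path)] res) := by
    funext mb p
    rw [pvRunB_eq_den]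
    have hF : pvFuel tree diameter_path = (2 * (tree.map List.length).sum + diameter_path.length + 1) + 1 := rfl
    rw [hF, pvDen_single]
  show List.foldl (fun (mb : List Int) (p : Int) =>
      (pvDfsA tree (PySem.Set.ofList diameter_path) (pvFuel tree diameter_path) p (-1) mb).2)
      (List.replicate tree.length 0) diameter_path =
    List.foldl (fun (res : List Int) (start : Int) =>
      pvRunB tree (PySem.Set.ofList diameter_path)
        [(start, -1, PySem.List.pyGetD tree start [], 0, pvFuel tree diameter_path)] res)
      (List.replicate tree.length 0) diameter_path
  rw [hfun]
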